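-- pv_equiv track=rewrite | github.com/CSStudySession/AlgoInPython | Meta/LC1762 Buildings With an Ocean View.py | two_side_occean_view
-- ===== SOURCE A (Python) =====
-- def two_side_occean_view(heights:list[int]) -> list[int]:
--     if not heights:
--         return []
--     size = len(heights)
--     if size == 1:
--         return [0]
--
--     left_view, right_view = [0], [size - 1]
--     left_max, right_max = heights[0], heights[-1]
--     left, right = 0, size - 1
--     while left < right:
--         if left_max < right_max:
--             left += 1
--             if heights[left] > left_max and left < right:
--                 left_view.append(left)
--                 left_max = heights[left]
--         else:
--             right -= 1
--             if heights[right] > right_max and left < right: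
--                 right_view.append(right)
--                 right_max = heights[right]
--     return left_view + right_view[::-1]
-- ===== SOURCE B (Python) =====
-- def two_side_occean_view(heights: list[int]) -> list[int]:
--     view = set()
--     best = None
--     for i, h in enumerate(heights):
--         if best is None or h > best:
--             view.add(i)
--             best = h
--     best = None
--     for i in range(len(heights) - 1, -1, -1):
--         h = heights[i]
--         if best is None or h > best:
--             view.add(i)
--             best = h
--     return sorted(view)
-- ===== Notes on version B (the rewrite author's own statement) =====
-- stated objective: simpler
-- what changed: Replaces the converging two-pointer sweep that interleaves two view lists and two maxima with two independent directional running-max passes collecting visible indices into a set, returned as sorted(set).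
import Mathlib
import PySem

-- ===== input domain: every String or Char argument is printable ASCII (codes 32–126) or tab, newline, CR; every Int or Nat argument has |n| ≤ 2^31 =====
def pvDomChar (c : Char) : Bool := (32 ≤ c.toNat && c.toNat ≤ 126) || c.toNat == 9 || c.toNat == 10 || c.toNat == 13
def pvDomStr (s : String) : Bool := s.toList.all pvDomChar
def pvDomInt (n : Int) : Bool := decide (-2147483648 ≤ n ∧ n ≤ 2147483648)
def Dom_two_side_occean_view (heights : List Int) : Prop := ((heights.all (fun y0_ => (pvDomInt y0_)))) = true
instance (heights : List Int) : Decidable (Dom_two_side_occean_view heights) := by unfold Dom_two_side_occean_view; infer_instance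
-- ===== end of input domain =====

-- B changes the decomposition: two independent directional running-max passes collecting a set,
-- returned sorted, instead of A's converging two-pointer sweep; objective: simpler.

-- ===== PORT A =====
-- A's while-loop; fuel = the pointer gap right-left, which decreases by exactly 1 each
-- iteration, so fuel 0 coincides with the loop exit l >= r (a pure totality guard).
-- Every index passed to pyGetD lies in 0..len-1 throughout the loop, so the total lookup
-- with default 0 is exact.
def pvLoopA (hs : List Int) : Nat → Int → Int → Int → Int → List Int → List Int → List Int
  | 0, _, _, _, _, lv, rv => lv ++ rv.reverse
  | fuel + 1, l, r, lm, rm, lv, rv =>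
    if l < r then
      if lm < rm then
        let l' := l + 1
        let hl := PySem.List.pyGetD hs l' 0
        if hl > lm ∧ l' < r then pvLoopA hs fuel l' r hl rm (lv ++ [l']) rv
        else pvLoopA hs fuel l' r lm rm lv rv
      else
        let r' := r - 1
        let hr := PySem.List.pyGetD hs r' 0
        if hr > rm ∧ l < r' then pvLoopA hs fuel l r' lm hr lv (rv ++ [r'])
        else pvLoopA hs fuel l r' lm rm lv rv
    else lv ++ rv.reverse

def two_side_occean_view (heights : List Int) : List Int :=
  if heights = [] then []
  else if heights.length = 1 then [0]
  else
    pvLoopA heights ((heights.length : Int) - 1).toNat 0 ((heights.length : Int) - 1)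
      (PySem.List.pyGetD heights 0 0) (PySem.List.pyGetD heights (-1) 0)
      [0] [(heights.length : Int) - 1]

-- ===== PORT B =====
-- one running-max step of Source B's loops: best is None -> take the element; else take it iff strictly greater
def pvStep (st : PySem.Set Int × Option Int) (p : Int × Int) : PySem.Set Int × Option Int :=
  match st.2 with
  | none => (PySem.Set.add st.1 p.1, some p.2)
  | some b => if p.2 > b then (PySem.Set.add st.1 p.1, some p.2) else st

def two_side_occean_view_alt (heights : List Int) : List Int :=
  let st1 := (PySem.List.enumerate heights 0).foldl pvStep (PySem.Set.empty, none)
  let st2 := (PySem.List.pyRange ((heights.length : Int) - 1) (-1) (-1)).foldl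
      (fun st i => pvStep st (i, PySem.List.pyGetD heights i 0)) (st1.1, none)
  PySem.List.sorted st2.1 (fun x => x) false

-- ===== PRECONDITION & SPEC =====
def Spec_two_side_occean_view (heights : List Int) (out : List Int) : Prop := out = two_side_occean_view_alt heights
instance (heights : List Int) (out : List Int) : Decidable (Spec_two_side_occean_view heights out) := by unfold Spec_two_side_occean_view; infer_instance

-- ===== CLAIM (what is proved, stated in full; the proofs are below) =====
def Claim_equal_two_side_occean_view : Prop := ∀ (heights : List Int), Dom_two_side_occean_view heights → Spec_two_side_occean_view heights (two_side_occean_view heights)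

-- ===== LEMMAS AND PROOFS =====
-- pvHD: element at an Int index (always used in range); pvLvB/pvRvB: visible from the
-- left / the right; pvCanon: the canonical answer both programs are shown to compute.
def pvHD (hs : List Int) (i : Int) : Int := PySem.List.pyGetD hs i 0

def pvLvB (hs : List Int) (i : Int) : Bool :=
  (PySem.List.pyRange 0 i 1).all (fun j => decide (pvHD hs j < pvHD hs i))

def pvRvB (hs : List Int) (i : Int) : Bool :=
  (PySem.List.pyRange (i + 1) (hs.length : Int) 1).all (fun j => decide (pvHD hs j < pvHD hs i))

def pvCanon (hs : List Int) : List Int :=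
  (PySem.List.pyRange 0 (hs.length : Int) 1).filter (fun i => pvLvB hs i || pvRvB hs i)

theorem pvLvB_iff (hs : List Int) (i : Int) :
    pvLvB hs i = true ↔ ∀ j, 0 ≤ j → j < i → pvHD hs j < pvHD hs i := by
  simp [pvLvB, List.all_eq_true, PySem.List.mem_pyRange_one]

theorem pvRvB_iff (hs : List Int) (i : Int) :
    pvRvB hs i = true ↔ ∀ j, i + 1 ≤ j → j < (hs.length : Int) → pvHD hs j < pvHD hs i := by
  simp [pvRvB, List.all_eq_true, PySem.List.mem_pyRange_one]

theorem pvLoopA_eq (hs : List Int) : ∀ (k : Nat) (l r lm rm : Int) (lv rv : List Int),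
    (r - l).toNat = k → 0 ≤ l → l < r → r ≤ (hs.length : Int) - 1 →
    (∀ j, 0 ≤ j → j ≤ l → pvHD hs j ≤ lm) → (∃ j, 0 ≤ j ∧ j ≤ l ∧ pvHD hs j = lm) →
    (∀ j, r ≤ j → j ≤ (hs.length : Int) - 1 → pvHD hs j ≤ rm) →
    (∃ j, r ≤ j ∧ j ≤ (hs.length : Int) - 1 ∧ pvHD hs j = rm) →
    pvLoopA hs k l r lm rm lv rv =
      lv ++ (PySem.List.pyRange (l + 1) r 1).filter (fun i => pvLvB hs i || pvRvB hs i) ++ rv.reverse := by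
  intro k
  induction k with
  | zero => intro l r lm rm lv rv hk _ hlr; omega
  | succ k ih =>
    intro l r lm rm lv rv hk h0 hlr hrn hlm1 hlm2 hrm1 hrm2
    obtain ⟨j₀, hj₀0, hj₀l, hj₀⟩ := hlm2
    obtain ⟨j₁, hj₁r, hj₁n, hj₁⟩ := hrm2
    simp only [pvLoopA]
    rw [if_pos hlr]
    by_cases hcmp : lm < rm
    · rw [if_pos hcmp]
      by_cases hlt : l + 1 < r
      · by_cases happ : PySem.List.pyGetD hs (l + 1) 0 > lm
        · rw [if_pos ⟨happ, hlt⟩]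
          have hlv : pvLvB hs (l + 1) = true := by
            rw [pvLvB_iff]; intro j hj0 hjl
            exact lt_of_le_of_lt (hlm1 j hj0 (by omega)) happ
          rw [ih (l+1) r (PySem.List.pyGetD hs (l+1) 0) rm (lv ++ [l+1]) rv (by omega) (by omega) hlt hrn
              (fun j hj0 hjl => by
                rcases lt_or_ge j (l+1) with h | h
                · exact le_of_lt (lt_of_le_of_lt (hlm1 j hj0 (by omega)) happ)
                · have : j = l + 1 := by omega
                  subst this; exact le_refl _)
              ⟨l+1, by omega, le_refl _, rfl⟩
              hrm1 ⟨j₁, hj₁r, hj₁n, hj₁⟩]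
          rw [PySem.List.pyRange_one_cons (by omega : l + 1 < r)]
          rw [List.filter_cons_of_pos (by simp [pvLvB, pvHD] at hlv ⊢; exact Or.inl hlv)]
          simp
        · rw [if_neg (by tauto)]
          push_neg at happ
          have hnlv : ¬ (pvLvB hs (l+1) = true) := by
            rw [pvLvB_iff]; push_neg
            exact ⟨j₀, hj₀0, by omega, by rw [hj₀]; exact happ⟩
          have hnrv : ¬ (pvRvB hs (l+1) = true) := by
            rw [pvRvB_iff]; push_neg
            refine ⟨j₁, by omega, by omega, ?_⟩
            rw [hj₁]
            calc pvHD hs (l+1) ≤ lm := happ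
              _ ≤ rm := le_of_lt hcmp
          rw [ih (l+1) r lm rm lv rv (by omega) (by omega) hlt hrn
              (fun j hj0 hjl => by
                rcases lt_or_ge j (l+1) with h | h
                · exact hlm1 j hj0 (by omega)
                · have : j = l + 1 := by omega
                  subst this; exact happ)
              ⟨j₀, hj₀0, by omega, hj₀⟩ hrm1 ⟨j₁, hj₁r, hj₁n, hj₁⟩]
          rw [PySem.List.pyRange_one_cons (by omega : l + 1 < r)]
          rw [List.filter_cons_of_neg (by simp [hnlv, hnrv])]
      · -- l + 1 = r : the remaining fuel is 0, the loop exits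
        have hreq : l + 1 = r := by omega
        have hkz : k = 0 := by omega
        subst hkz
        rw [if_neg (by tauto)]
        simp only [pvLoopA]
        rw [PySem.List.pyRange_one_eq_nil (by omega)]
        simp
    · rw [if_neg hcmp]
      push_neg at hcmp
      by_cases hlt : l < r - 1
      · by_cases happ : PySem.List.pyGetD hs (r - 1) 0 > rm
        · rw [if_pos ⟨happ, hlt⟩]
          have hrv : pvRvB hs (r - 1) = true := by
            rw [pvRvB_iff]; intro j hj0 hjl
            exact lt_of_le_of_lt (hrm1 j (by omega) (by omega)) happ
          rw [ih l (r-1) lm (PySem.List.pyGetD hs (r-1) 0) lv (rv ++ [r-1]) (by omega) h0 hlt (by omega)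
              hlm1 ⟨j₀, hj₀0, hj₀l, hj₀⟩
              (fun j hjr hjn => by
                rcases lt_or_ge (r-1) j with h | h
                · exact le_of_lt (lt_of_le_of_lt (hrm1 j (by omega) hjn) happ)
                · have : j = r - 1 := by omega
                  subst this; exact le_refl _)
              ⟨r-1, le_refl _, by omega, rfl⟩]
          rw [show r = (r - 1) + 1 by omega, PySem.List.pyRange_one_succ_right (by omega : l + 1 ≤ r - 1)]
          rw [List.filter_append]
          rw [List.filter_cons_of_pos (by simp [pvRvB, pvHD] at hrv ⊢; exact Or.inr hrv)]
          simp
        · rw [if_neg (by tauto)]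
          push_neg at happ
          have hnrv : ¬ (pvRvB hs (r-1) = true) := by
            rw [pvRvB_iff]; push_neg
            exact ⟨j₁, by omega, by omega, by rw [hj₁]; exact happ⟩
          have hnlv : ¬ (pvLvB hs (r-1) = true) := by
            rw [pvLvB_iff]; push_neg
            refine ⟨j₀, hj₀0, by omega, ?_⟩
            rw [hj₀]
            calc pvHD hs (r-1) ≤ rm := happ
              _ ≤ lm := hcmp
          rw [ih l (r-1) lm rm lv rv (by omega) h0 hlt (by omega)
              hlm1 ⟨j₀, hj₀0, hj₀l, hj₀⟩
              (fun j hjr hjn => by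
                rcases lt_or_ge (r-1) j with h | h
                · exact hrm1 j (by omega) hjn
                · have : j = r - 1 := by omega
                  subst this; exact happ)
              ⟨j₁, by omega, hj₁n, hj₁⟩]
          rw [show r = (r - 1) + 1 by omega, PySem.List.pyRange_one_succ_right (by omega : l + 1 ≤ r - 1)]
          rw [List.filter_append]
          rw [List.filter_cons_of_neg (by simp [hnlv, hnrv])]
          simp
      · -- l = r - 1 : the remaining fuel is 0, the loop exits
        have hkz : k = 0 := by omega
        subst hkz
        rw [if_neg (by tauto)]
        simp only [pvLoopA]
        rw [PySem.List.pyRange_one_eq_nil (by omega)]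
        simp

theorem pvA_eq_canon (hs : List Int) : two_side_occean_view hs = pvCanon hs := by
  unfold two_side_occean_view
  by_cases h0 : hs = []
  · subst h0
    simp [pvCanon, PySem.List.pyRange_one_eq_nil]
  · rw [if_neg h0]
    by_cases h1 : hs.length = 1
    · rw [if_pos h1]
      have hLv0 : pvLvB hs 0 = true := by
        simp [pvLvB, PySem.List.pyRange_one_eq_nil]
      rw [pvCanon, h1]
      have e1 : PySem.List.pyRange 0 ((1 : Nat) : Int) 1 = [0] := by decide
      rw [e1]
      simp [hLv0]
    · have hn : 2 ≤ hs.length := by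
        rcases hs with _ | ⟨a, _ | ⟨b, t⟩⟩ <;> simp_all
      rw [if_neg h1]
      have hnInt : (2 : Int) ≤ (hs.length : Int) := by exact_mod_cast hn
      have hneg : PySem.List.pyGetD hs (-1) 0 = pvHD hs ((hs.length : Int) - 1) := by
        rw [PySem.List.pyGetD_neg_ofNat hs 1 0 (by omega) (by omega), pvHD,
            PySem.List.pyGetD_eq_getElem (xs := hs) (i := (hs.length : Int) - 1) (d := 0)
              (by omega) (by omega)]
        congr 1
        omega
      rw [hneg]
      rw [pvLoopA_eq hs ((hs.length : Int) - 1).toNat 0 ((hs.length : Int) - 1)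
            (PySem.List.pyGetD hs 0 0) (pvHD hs ((hs.length : Int) - 1)) [0] [(hs.length : Int) - 1]
            (by omega) le_rfl (by omega) le_rfl
            (fun j hj0 hjl => by
              have : j = 0 := by omega
              subst this; exact le_refl _)
            ⟨0, le_rfl, le_rfl, rfl⟩
            (fun j hjr hjn => by
              have : j = (hs.length : Int) - 1 := by omega
              subst this; exact le_refl _)
            ⟨(hs.length : Int) - 1, le_rfl, le_rfl, rfl⟩]
      have hLv0 : pvLvB hs 0 = true := by
        simp [pvLvB, PySem.List.pyRange_one_eq_nil]
      have hRvLast : pvRvB hs ((hs.length : Int) - 1) = true := by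
        simp [pvRvB, PySem.List.pyRange_one_eq_nil]
      rw [pvCanon]
      rw [PySem.List.pyRange_one_append 0 1 (hs.length : Int) (by omega) (by omega)]
      rw [PySem.List.pyRange_one_append 1 ((hs.length : Int) - 1) (hs.length : Int) (by omega) (by omega)]
      have e1 : PySem.List.pyRange 0 1 1 = [0] := by decide
      have e2 : PySem.List.pyRange ((hs.length : Int) - 1) (hs.length : Int) 1 = [(hs.length : Int) - 1] := by
        rw [PySem.List.pyRange_one_cons (by omega), PySem.List.pyRange_one_eq_nil (by omega)]
      rw [e1, e2]
      simp [hLv0, hRvLast]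

theorem pvFwd (hs : List Int) : ∀ (suf : List Int) (a : Int) (s : PySem.Set Int) (ob : Option Int),
    0 ≤ a → suf = hs.drop a.toNat →
    ((ob = none ∧ a = 0) ∨
      (∃ b, ob = some b ∧ (∀ j, 0 ≤ j → j < a → pvHD hs j ≤ b) ∧ ∃ j, 0 ≤ j ∧ j < a ∧ pvHD hs j = b)) →
    s.Nodup →
    (((PySem.List.enumerate suf a).foldl pvStep (s, ob)).1.Nodup ∧
      ∀ x, x ∈ ((PySem.List.enumerate suf a).foldl pvStep (s, ob)).1 ↔
        x ∈ s ∨ (a ≤ x ∧ x < (hs.length : Int) ∧ pvLvB hs x = true)) := by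
  intro suf
  induction suf with
  | nil =>
    intro a s ob ha hsuf hob hnd
    have hlen : hs.length ≤ a.toNat := by
      have h2 := congrArg List.length hsuf
      simp at h2
      omega
    simp only [PySem.List.enumerate_nil, List.foldl_nil]
    refine ⟨hnd, fun x => ?_⟩
    constructor
    · exact Or.inl
    · rintro (h | ⟨h1, h2, _⟩)
      · exact h
      · omega
  | cons x suf' ihsuf =>
    intro a s ob ha hsuf hob hnd
    have halen : a.toNat < hs.length := by
      by_contra h
      push_neg at h
      rw [List.drop_eq_nil_of_le h] at hsuf
      simp at hsuf
    have hdrop := List.drop_eq_getElem_cons (h := halen)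
    rw [← hsuf] at hdrop
    obtain ⟨hx, hsuf'⟩ := List.cons.inj hdrop
    have hHDa : pvHD hs a = x := by
      rw [pvHD, PySem.List.pyGetD_eq_getElem (xs := hs) (i := a) (d := 0) (by omega) (by omega), hx]
    have hsuf'' : suf' = hs.drop (a + 1).toNat := by
      rw [hsuf', show (a + 1).toNat = a.toNat + 1 by omega]
    rw [PySem.List.enumerate_cons, List.foldl_cons]
    -- does the step add index a?
    have hadd : (pvStep (s, ob) (a, x) = (PySem.Set.add s a, some x) ∧ pvLvB hs a = true) ∨
        (pvStep (s, ob) (a, x) = (s, ob) ∧ (∃ b', ob = some b' ∧ x ≤ b') ∧ pvLvB hs a = false) := by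
      rcases hob with ⟨hnone, ha0⟩ | ⟨b, hsome, hb1, j, hj0, hja, hjb⟩
      · left
        subst hnone ha0
        refine ⟨rfl, ?_⟩
        rw [pvLvB_iff]
        intro j hj0 hj1
        omega
      · subst hsome
        by_cases hgt : x > b
        · left
          refine ⟨by simp [pvStep, hgt], ?_⟩
          rw [pvLvB_iff]
          intro j' hj'0 hj'a
          rw [hHDa]
          exact lt_of_le_of_lt (hb1 j' hj'0 hj'a) hgt
        · right
          refine ⟨by simp [pvStep, hgt], ⟨b, rfl, by omega⟩, ?_⟩
          rw [Bool.eq_false_iff]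
          intro hcon
          rw [pvLvB_iff] at hcon
          have := hcon j hj0 hja
          rw [hjb, hHDa] at this
          omega
    rcases hadd with ⟨heq, hlva⟩ | ⟨heq, ⟨bq, hbq, hxbq⟩, hlva⟩
    · rw [heq]
      have hob' : (some x = none ∧ a + 1 = 0) ∨
          (∃ b, (some x : Option Int) = some b ∧ (∀ j, 0 ≤ j → j < a + 1 → pvHD hs j ≤ b) ∧
            ∃ j, 0 ≤ j ∧ j < a + 1 ∧ pvHD hs j = b) := by
        right
        refine ⟨x, rfl, fun j hj0 hja => ?_, a, ha, by omega, hHDa⟩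
        rcases lt_or_ge j a with h | h
        · -- j < a: pvHD j < pvHD a = x since pvLvB a
          rw [pvLvB_iff] at hlva
          exact le_of_lt (by rw [← hHDa]; exact hlva j hj0 h)
        · have : j = a := by omega
          subst this
          rw [hHDa]
      obtain ⟨h1, h2⟩ := ihsuf (a + 1) (PySem.Set.add s a) (some x) (by omega) hsuf'' hob'
        (PySem.Set.nodup_add s a hnd)
      refine ⟨h1, fun y => ?_⟩
      rw [h2 y, PySem.Set.mem_add]
      constructor
      · rintro ((h | h) | h)
        · exact Or.inl h
        · subst h
          exact Or.inr ⟨le_refl _, by omega, hlva⟩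
        · exact Or.inr ⟨by omega, h.2.1, h.2.2⟩
      · rintro (h | ⟨hax, hxlen, hlvx⟩)
        · exact Or.inl (Or.inl h)
        · rcases eq_or_lt_of_le hax with h | h
          · exact Or.inl (Or.inr h.symm)
          · exact Or.inr ⟨by omega, hxlen, hlvx⟩
    · rw [heq]
      rcases hob with ⟨hnone, _⟩ | ⟨b', hsome', hb1, j, hj0, hja, hjb⟩
      · rw [hnone] at hbq; exact absurd hbq (by simp)
      · have hbb : bq = b' := by
          rw [hsome'] at hbq
          exact (Option.some.inj hbq).symm
        subst hbb
        have hob' : ((ob = none ∧ a + 1 = 0) ∨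
            (∃ b, ob = some b ∧ (∀ j, 0 ≤ j → j < a + 1 → pvHD hs j ≤ b) ∧
              ∃ j, 0 ≤ j ∧ j < a + 1 ∧ pvHD hs j = b)) := by
          right
          refine ⟨bq, hsome', fun j' hj'0 hj'a => ?_, j, hj0, by omega, hjb⟩
          rcases lt_or_ge j' a with h | h
          · exact hb1 j' hj'0 h
          · have : j' = a := by omega
            subst this
            rw [hHDa]; omega
        obtain ⟨h1, h2⟩ := ihsuf (a + 1) s ob (by omega) hsuf'' hob' hnd
        refine ⟨h1, fun y => ?_⟩
        rw [h2 y]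
        constructor
        · rintro (h | h)
          · exact Or.inl h
          · exact Or.inr ⟨by omega, h.2.1, h.2.2⟩
        · rintro (h | ⟨hax, hxlen, hlvx⟩)
          · exact Or.inl h
          · rcases eq_or_lt_of_le hax with h | h
            · subst h
              rw [hlvx] at hlva
              exact absurd hlva (by simp)
            · exact Or.inr ⟨by omega, hxlen, hlvx⟩

theorem pvBwd (hs : List Int) : ∀ (k : Nat) (a : Int) (s : PySem.Set Int) (ob : Option Int),
    (a + 1).toNat = k → a ≤ (hs.length : Int) - 1 →
    ((ob = none ∧ a = (hs.length : Int) - 1) ∨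
      (∃ b, ob = some b ∧ (∀ j, a < j → j < (hs.length : Int) → pvHD hs j ≤ b) ∧
        ∃ j, a < j ∧ j < (hs.length : Int) ∧ pvHD hs j = b)) →
    s.Nodup →
    ((((PySem.List.pyRange a (-1) (-1)).foldl
        (fun st i => pvStep st (i, PySem.List.pyGetD hs i 0)) (s, ob)).1.Nodup ∧
      ∀ x, x ∈ ((PySem.List.pyRange a (-1) (-1)).foldl
        (fun st i => pvStep st (i, PySem.List.pyGetD hs i 0)) (s, ob)).1 ↔
        x ∈ s ∨ (0 ≤ x ∧ x ≤ a ∧ pvRvB hs x = true))) := by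
  intro k
  induction k with
  | zero =>
    intro a s ob hk ha hob hnd
    rw [PySem.List.pyRange_neg_one_eq_nil (by omega)]
    simp only [List.foldl_nil]
    refine ⟨hnd, fun x => ?_⟩
    constructor
    · exact Or.inl
    · rintro (h | ⟨h1, h2, _⟩)
      · exact h
      · omega
  | succ k ih =>
    intro a s ob hk ha hob hnd
    have ha0 : 0 ≤ a := by clear hob; omega
    have hk' : (a - 1 + 1).toNat = k := by clear hob; omega
    have ha' : a - 1 ≤ (hs.length : Int) - 1 := by clear hob; omega
    rw [PySem.List.pyRange_neg_one_cons (by omega)]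
    rw [List.foldl_cons]
    have hHDa : PySem.List.pyGetD hs a 0 = pvHD hs a := rfl
    have hadd : (pvStep (s, ob) (a, PySem.List.pyGetD hs a 0) = (PySem.Set.add s a, some (pvHD hs a)) ∧
          pvRvB hs a = true) ∨
        (pvStep (s, ob) (a, PySem.List.pyGetD hs a 0) = (s, ob) ∧
          (∃ b', ob = some b' ∧ pvHD hs a ≤ b') ∧ pvRvB hs a = false) := by
      rcases hob with ⟨hnone, halast⟩ | ⟨b, hsome, hb1, j, hja, hjn, hjb⟩
      · left
        subst hnone
        refine ⟨rfl, ?_⟩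
        rw [pvRvB_iff]
        intro j hj1 hj2
        omega
      · subst hsome
        by_cases hgt : pvHD hs a > b
        · left
          refine ⟨by simp [pvStep, hHDa, hgt], ?_⟩
          rw [pvRvB_iff]
          intro j' hj'1 hj'2
          exact lt_of_le_of_lt (hb1 j' (by omega) hj'2) hgt
        · right
          refine ⟨by simp [pvStep, hHDa]; intro hc; omega, ⟨b, rfl, by omega⟩, ?_⟩
          rw [Bool.eq_false_iff]
          intro hcon
          rw [pvRvB_iff] at hcon
          have := hcon j (by omega) hjn
          rw [hjb] at this
          omega
    rcases hadd with ⟨heq, hrva⟩ | ⟨heq, ⟨bq, hbq, habq⟩, hrva⟩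
    · rw [heq]
      have hob' : ((some (pvHD hs a) = none ∧ a - 1 = (hs.length : Int) - 1) ∨
          (∃ b, (some (pvHD hs a) : Option Int) = some b ∧
            (∀ j, a - 1 < j → j < (hs.length : Int) → pvHD hs j ≤ b) ∧
            ∃ j, a - 1 < j ∧ j < (hs.length : Int) ∧ pvHD hs j = b)) := by
        right
        refine ⟨pvHD hs a, rfl, fun j hj1 hj2 => ?_, a, by omega, by omega, rfl⟩
        rcases lt_or_ge a j with h | h
        · rw [pvRvB_iff] at hrva
          exact le_of_lt (hrva j (by omega) hj2)
        · have : j = a := by omega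
          subst this
          exact le_refl _
      obtain ⟨h1, h2⟩ := ih (a - 1) (PySem.Set.add s a) (some (pvHD hs a)) hk' ha'
        hob' (PySem.Set.nodup_add s a hnd)
      refine ⟨h1, fun y => ?_⟩
      rw [h2 y, PySem.Set.mem_add]
      constructor
      · rintro ((h | h) | h)
        · exact Or.inl h
        · subst h
          exact Or.inr ⟨by omega, le_refl _, hrva⟩
        · exact Or.inr ⟨h.1, by omega, h.2.2⟩
      · rintro (h | ⟨h0x, hxa, hrvx⟩)
        · exact Or.inl (Or.inl h)
        · rcases eq_or_lt_of_le hxa with h | h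
          · exact Or.inl (Or.inr h)
          · exact Or.inr ⟨h0x, by omega, hrvx⟩
    · rw [heq]
      rcases hob with ⟨hnone, _⟩ | ⟨b', hsome', hb1, j, hja, hjn, hjb⟩
      · rw [hnone] at hbq; exact absurd hbq (by simp)
      · have hbb : bq = b' := by
          rw [hsome'] at hbq
          exact (Option.some.inj hbq).symm
        subst hbb
        have hob' : ((ob = none ∧ a - 1 = (hs.length : Int) - 1) ∨
            (∃ b, ob = some b ∧ (∀ j, a - 1 < j → j < (hs.length : Int) → pvHD hs j ≤ b) ∧
              ∃ j, a - 1 < j ∧ j < (hs.length : Int) ∧ pvHD hs j = b)) := by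
          right
          refine ⟨bq, hsome', fun j' hj'1 hj'2 => ?_, j, by omega, hjn, hjb⟩
          rcases lt_or_ge a j' with h | h
          · exact hb1 j' h hj'2
          · have : j' = a := by omega
            subst this
            omega
        obtain ⟨h1, h2⟩ := ih (a - 1) s ob hk' ha' hob' hnd
        refine ⟨h1, fun y => ?_⟩
        rw [h2 y]
        constructor
        · rintro (h | h)
          · exact Or.inl h
          · exact Or.inr ⟨h.1, by omega, h.2.2⟩
        · rintro (h | ⟨h0x, hxa, hrvx⟩)
          · exact Or.inl h
          · rcases eq_or_lt_of_le hxa with h | h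
            · subst h
              rw [hrvx] at hrva
              exact absurd hrva (by simp)
            · exact Or.inr ⟨h0x, by omega, hrvx⟩

theorem pvB_eq_canon (hs : List Int) : two_side_occean_view_alt hs = pvCanon hs := by
  unfold two_side_occean_view_alt
  obtain ⟨nd1, mem1⟩ := pvFwd hs hs 0 PySem.Set.empty none le_rfl (by simp)
    (Or.inl ⟨rfl, rfl⟩) List.nodup_nil
  obtain ⟨nd2, mem2⟩ := pvBwd hs ((hs.length : Int) - 1 + 1).toNat ((hs.length : Int) - 1)
    ((PySem.List.enumerate hs 0).foldl pvStep (PySem.Set.empty, none)).1 none rfl le_rfl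
    (Or.inl ⟨rfl, rfl⟩) nd1
  have hNodupCanon : (pvCanon hs).Nodup :=
    (PySem.List.nodup_pyRange_one 0 ((hs.length : Int))).filter _
  have hPairCanon : (pvCanon hs).Pairwise (· < ·) :=
    (PySem.List.pairwise_lt_pyRange_one 0 ((hs.length : Int))).filter _
  have hmemCanon : ∀ x, x ∈ pvCanon hs ↔
      (0 ≤ x ∧ x < (hs.length : Int) ∧ (pvLvB hs x = true ∨ pvRvB hs x = true)) := by
    intro x
    simp [pvCanon, List.mem_filter, PySem.List.mem_pyRange_one]
    tauto
  have hperm : (pvCanon hs).Perm (((PySem.List.pyRange ((hs.length : Int) - 1) (-1) (-1)).foldl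
      (fun st i => pvStep st (i, PySem.List.pyGetD hs i 0))
      (((PySem.List.enumerate hs 0).foldl pvStep (PySem.Set.empty, none)).1, none)).1) := by
    rw [List.perm_ext_iff_of_nodup hNodupCanon nd2]
    intro x
    rw [hmemCanon x, mem2 x, mem1 x]
    constructor
    · rintro ⟨h0, h1, h2 | h2⟩
      · exact Or.inl (Or.inr ⟨h0, h1, h2⟩)
      · exact Or.inr ⟨h0, by omega, h2⟩
    · rintro ((h | ⟨h0, h1, h2⟩) | ⟨h0, h1, h2⟩)
      · simp at h
      · exact ⟨h0, h1, Or.inl h2⟩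
      · exact ⟨h0, by omega, Or.inr h2⟩
  exact PySem.List.sorted_eq_of_perm_of_pairwise_lt _ _ _ hperm hPairCanon

-- ===== VERDICT (by name: the statement is the Claim_ definition above) =====
theorem two_side_occean_view_spec : Claim_equal_two_side_occean_view := by
  intro hs _
  unfold Spec_two_side_occean_view
  rw [pvA_eq_canon, pvB_eq_canon]
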